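-- pv_equiv track=rewrite | github.com/sundaramvivek10/FoobarChalleneges | try4.py | sortStateIdx
-- ===== SOURCE A (Python) =====
-- def sortStateIdx(list):
--     index = []
--     for i in range(len(list)):
--         if all(state == 0 for state in list[i]):
--             index.append(i)
--
--     for i in range(len(list)):
--         if any(state != 0 for state in list[i]):
--             index.append(i)
--     return index
-- ===== SOURCE B (Python) =====
-- def sortStateIdx(list):
--     zeros = []
--     nonzeros = []
--     for i, row in enumerate(list):
--         if all(s == 0 for s in row):
--             zeros.append(i)
--         else:
--             nonzeros.append(i)
--     return zeros + nonzeros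
-- ===== Notes on version B (the rewrite author's own statement) =====
-- stated objective: simpler
-- what changed: Replaces A's two full passes (one selecting all-zero rows, one re-scanning for non-zero rows) by a single enumerate pass that sorts each index into one of two accumulator lists, concatenated at the end.
import Mathlib
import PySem

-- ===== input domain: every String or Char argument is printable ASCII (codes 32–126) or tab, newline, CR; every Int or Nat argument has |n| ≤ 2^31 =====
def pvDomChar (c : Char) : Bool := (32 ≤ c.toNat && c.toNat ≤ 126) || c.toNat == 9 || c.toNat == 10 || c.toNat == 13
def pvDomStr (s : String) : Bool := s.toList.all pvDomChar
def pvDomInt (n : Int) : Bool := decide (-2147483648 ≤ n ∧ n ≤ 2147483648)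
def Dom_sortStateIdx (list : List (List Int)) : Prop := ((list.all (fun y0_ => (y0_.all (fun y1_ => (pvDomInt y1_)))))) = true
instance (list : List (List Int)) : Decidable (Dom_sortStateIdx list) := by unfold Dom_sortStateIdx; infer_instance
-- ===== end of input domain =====

-- B replaces A's two full passes over the list by one enumerate pass with two accumulators (simpler, single pass; same asymptotic cost).

-- ===== PORT A =====
-- two passes over range(len(list)), indexing list[i] each time; append matching i
def sortStateIdx (list : List (List Int)) : List Int :=
  let index : List Int :=
    (PySem.List.pyRange 0 (list.length : Int) 1).foldl
      (fun acc i =>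
        if (PySem.List.pyGetD list i []).all (fun state => state == 0) then acc ++ [i] else acc) []
  (PySem.List.pyRange 0 (list.length : Int) 1).foldl
    (fun acc i =>
      if (PySem.List.pyGetD list i []).any (fun state => state != 0) then acc ++ [i] else acc) index

-- ===== PORT B =====
-- single pass over enumerate(list) sorting each index into zeros / nonzeros, then zeros ++ nonzeros
def sortStateIdx_alt (list : List (List Int)) : List Int :=
  let p :=
    (PySem.List.enumerate list).foldl
      (fun (acc : List Int × List Int) (ir : Int × List Int) =>
        if ir.2.all (fun s => s == 0) then (acc.1 ++ [ir.1], acc.2)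
        else (acc.1, acc.2 ++ [ir.1])) ([], [])
  p.1 ++ p.2

-- ===== PRECONDITION & SPEC =====
def Spec_sortStateIdx (list : List (List Int)) (out : List Int) : Prop := out = sortStateIdx_alt list
instance (list : List (List Int)) (out : List Int) : Decidable (Spec_sortStateIdx list out) := by unfold Spec_sortStateIdx; infer_instance

-- ===== CLAIM (what is proved, stated in full; the proofs are below) =====
def Claim_equal_sortStateIdx : Prop := ∀ (list : List (List Int)), Dom_sortStateIdx list → Spec_sortStateIdx list (sortStateIdx list)

-- ===== LEMMAS AND PROOFS =====

-- B's pair-accumulator fold, characterised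
theorem pairFold_eq {α : Type} (L : List α) (q : α → Bool) (k : α → Int)
    (z n : List Int) :
    L.foldl (fun acc x => if q x then (acc.1 ++ [k x], acc.2) else (acc.1, acc.2 ++ [k x])) (z, n)
      = (z ++ (L.filter q).map k, n ++ (L.filter (fun x => !q x)).map k) := by
  induction L generalizing z n with
  | nil => simp
  | cons hd tl ih =>
    by_cases h : q hd = true
    · simp [h, ih]
    · simp only [Bool.not_eq_true] at h
      simp [h, ih]

-- any (state != 0) is the complement of all (state == 0)
theorem any_ne_eq_not_all (r : List Int) :
    (r.any fun state => state != 0) = !(r.all fun state => state == 0) := by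
  induction r with
  | nil => simp
  | cons hd tl ih =>
    simp only [List.any_cons, List.all_cons, Bool.not_and, ih]
    rfl

theorem sortStateIdx_spec : Claim_equal_sortStateIdx := by
  intro list _
  unfold Spec_sortStateIdx sortStateIdx sortStateIdx_alt
  have hen := PySem.List.enumerate_eq_map_pyRange (xs := list) ([] : List Int)
  simp only [PySem.List.len] at hen
  simp only [hen, List.foldl_map, pairFold_eq, PySem.List.foldl_append_if_eq_filter,
    any_ne_eq_not_all, List.nil_append]
  simp
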